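-- pv_equiv track=rewrite | github.com/aisspr/leetcode | GCA/mock3.py | question1
-- ===== SOURCE A (Python) =====
-- def question1(arr, k):
--     if not arr:
--         return []
--     result = arr
--     for _ in range(k):
--         transformed_arr = []
--         for el in result:
--             if el % 2 == 0:
--                 el = el // 2
--             else:
--                 el = el*3+1
--             transformed_arr.append(el)
--         result = transformed_arr
--     return result
-- ===== SOURCE B (Python) =====
-- def question1(arr, k):
--     # Per-element cycle detection with modular skip instead of k full passes.
--     def step(x):
--         return x // 2 if x % 2 == 0 else 3 * x + 1
--
--     def apply_k(x):
--         seen = {}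
--         traj = []
--         i = 0
--         cur = x
--         while i < k:
--             s = seen.get(cur)
--             if s is not None:
--                 cycle = i - s
--                 return traj[s + (k - s) % cycle]
--             seen[cur] = i
--             traj.append(cur)
--             cur = step(cur)
--             i += 1
--         return cur
--
--     return [apply_k(x) for x in arr]
-- ===== Notes on version B (the rewrite author's own statement) =====
-- stated objective: faster
-- what changed: Instead of k full passes over the array, B processes each element independently, detecting the cycle of its Collatz trajectory with a hash map and jumping the remaining iterations with a modular index into the recorded trajectory.
import Mathlib
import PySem

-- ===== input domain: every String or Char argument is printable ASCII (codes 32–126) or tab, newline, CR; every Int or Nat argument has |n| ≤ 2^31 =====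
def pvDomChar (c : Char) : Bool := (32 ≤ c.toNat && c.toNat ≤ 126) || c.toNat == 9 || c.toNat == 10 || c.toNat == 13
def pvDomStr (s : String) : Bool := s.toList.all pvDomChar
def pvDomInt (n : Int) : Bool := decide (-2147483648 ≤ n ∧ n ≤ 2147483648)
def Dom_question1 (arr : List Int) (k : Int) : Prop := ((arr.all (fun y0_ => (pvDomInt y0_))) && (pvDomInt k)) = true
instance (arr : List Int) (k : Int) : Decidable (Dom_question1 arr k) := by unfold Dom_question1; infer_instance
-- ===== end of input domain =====

-- B replaces A's k whole-array passes by per-element cycle detection with a modular skip (measured asymptotically faster).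


-- ===== PORT A =====
def pvStepA (el : Int) : Int :=
  if PySem.Int.mod el 2 = 0 then PySem.Int.floordiv el 2 else el * 3 + 1

def question1 (arr : List Int) (k : Int) : List Int :=
  if arr = [] then []
  else
    (PySem.List.pyRange 0 k 1).foldl
      (fun result _ => result.foldl (fun t el => t ++ [pvStepA el]) []) arr

-- ===== PORT B =====
def pvStep (x : Int) : Int :=
  if PySem.Int.mod x 2 = 0 then PySem.Int.floordiv x 2 else 3 * x + 1

-- while-loop of apply_k; fuel = k - i (the loop runs at most k.toNat times).
-- traj[...] in Source B never raises (the index is < len(traj) when reached); the .getD 0 branch is unreachable.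
def pvGo (k : Int) : Nat → Int → PySem.Dict Int Int → List Int → Int → Int
  | 0, _, _, _, cur => cur
  | fuel + 1, i, seen, traj, cur =>
    match seen.get? cur with
    | some s => (PySem.List.pyGet? traj (s + PySem.Int.mod (k - s) (i - s))).getD 0
    | none => pvGo k fuel (i + 1) (seen.insert cur i) (traj ++ [cur]) (pvStep cur)

def pvApplyK (k : Int) (x : Int) : Int :=
  pvGo k k.toNat 0 PySem.Dict.empty [] x

def question1_alt (arr : List Int) (k : Int) : List Int :=
  arr.map (pvApplyK k)

-- ===== PRECONDITION & SPEC =====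
def Spec_question1 (arr : List Int) (k : Int) (out : List Int) : Prop := out = question1_alt arr k
instance (arr : List Int) (k : Int) (out : List Int) : Decidable (Spec_question1 arr k out) := by unfold Spec_question1; infer_instance

-- ===== CLAIM (what is proved, stated in full; the proofs are below) =====
def Claim_equal_question1 : Prop := ∀ (arr : List Int) (k : Int), Dom_question1 arr k → Spec_question1 arr k (question1 arr k)

-- ===== LEMMAS AND PROOFS =====

theorem pvStepA_eq (x : Int) : pvStepA x = pvStep x := by
  unfold pvStepA pvStep; split <;> ring

theorem inner_foldl (l acc : List Int) :
    l.foldl (fun t el => t ++ [pvStepA el]) acc = acc ++ l.map pvStep := by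
  induction l generalizing acc with
  | nil => simp
  | cons a l ih => rw [List.foldl_cons, ih, pvStepA_eq]; simp

theorem outer_foldl (l : List Int) (arr : List Int) :
    l.foldl (fun r (_ : Int) => r.foldl (fun t el => t ++ [pvStepA el]) []) arr
      = arr.map (pvStep^[l.length]) := by
  induction l generalizing arr with
  | nil => simp
  | cons a l ih =>
    rw [List.foldl_cons, inner_foldl, List.nil_append, ih, List.map_map, List.length_cons]
    exact List.map_congr_left (fun x _ => by
      simp only [Function.comp_apply]
      exact (Function.iterate_succ_apply pvStep l.length x).symm)

theorem questionA_eq_map (arr : List Int) (k : Int) :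
    question1 arr k = arr.map (pvStep^[k.toNat]) := by
  unfold question1
  split
  · simp [*]
  · rw [outer_foldl, PySem.List.length_pyRange_one]
    norm_num

theorem periodic_iterate (x : Int) (s c : Nat) (hc : 0 < c)
    (h : pvStep^[s + c] x = pvStep^[s] x) :
    ∀ m, pvStep^[s + m] x = pvStep^[s + m % c] x := by
  intro m
  induction m using Nat.strong_induction_on with
  | _ m ih =>
    by_cases hm : m < c
    · rw [Nat.mod_eq_of_lt hm]
    · push Not at hm
      have h1 : s + m = (m - c) + (s + c) := by omega
      have h2 : pvStep^[s + m] x = pvStep^[s + (m - c)] x := by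
        rw [h1, Function.iterate_add_apply, h,
          ← Function.iterate_add_apply]
        congr 1; omega
      rw [h2, ih (m - c) (by omega), Nat.mod_eq_sub_mod hm]

theorem pvGo_correct (k : Int) (x : Int) :
    ∀ (fuel L : Nat) (seen : PySem.Dict Int Int) (traj : List Int),
      fuel + L = k.toNat →
      traj.length = L →
      (∀ j : Nat, j < L → traj[j]? = some (pvStep^[j] x)) →
      (∀ v s, seen.get? v = some s →
        ∃ s' : Nat, s = (s' : Int) ∧ s' < L ∧ pvStep^[s'] x = v) →
      pvGo k fuel (L : Int) seen traj (pvStep^[L] x) = pvStep^[k.toNat] x := by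
  intro fuel
  induction fuel with
  | zero =>
    intro L seen traj hfl _ _ _
    simp [pvGo]
    congr 1; omega
  | succ fuel ih =>
    intro L seen traj hfl hlen hidx hseen
    cases hg : seen.get? (pvStep^[L] x) with
    | none =>
      simp only [pvGo, hg]
      have hcast : ((L : Int) + 1) = ((L + 1 : Nat) : Int) := by push_cast; ring
      rw [hcast]
      have hih := ih (L + 1) (seen.insert (pvStep^[L] x) (L : Int)) (traj ++ [pvStep^[L] x])
        (by omega) (by simp [hlen])
        (by
          intro j hj
          by_cases hjL : j < L
          · rw [List.getElem?_append_left (by omega), hidx j hjL]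
          · have hj' : j = L := by omega
            subst hj'
            rw [← hlen, List.getElem?_concat_length])
        (by
          intro v s hvs
          rw [PySem.Dict.get?_insert] at hvs
          by_cases hv : v = pvStep^[L] x
          · subst hv
            rw [if_pos rfl] at hvs
            injection hvs with h
            exact ⟨L, h.symm, by omega, rfl⟩
          · rw [if_neg hv] at hvs
            obtain ⟨s', h1, h2, h3⟩ := hseen v s hvs
            exact ⟨s', h1, by omega, h3⟩)
      rw [show pvStep (pvStep^[L] x) = pvStep^[L + 1] x from
        (Function.iterate_succ_apply' pvStep L x).symm]
      exact hih
    | some s =>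
      simp only [pvGo, hg]
      obtain ⟨s', rfl, hs'L, hfs⟩ := hseen _ _ hg
      have hkpos : 0 < k.toNat := by omega
      have hk : k = (k.toNat : Int) := by omega
      set K := k.toNat with hK
      set c := L - s' with hc
      have hcpos : 0 < c := by omega
      have hiL : (L : Int) - (s' : Int) = ((c : Nat) : Int) := by omega
      have hks : k - (s' : Int) = (((K - s' : Nat)) : Int) := by omega
      have hmod : PySem.Int.mod (k - (s' : Int)) ((L : Int) - (s' : Int))
          = (((K - s') % c : Nat) : Int) := by
        rw [hiL, hks]; exact_mod_cast PySem.Int.mod_natCast (K - s') c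
      have hidxcast : (s' : Int) + (((K - s') % c : Nat) : Int)
          = ((s' + (K - s') % c : Nat) : Int) := by push_cast; ring
      have hlt : s' + (K - s') % c < L := by
        have := Nat.mod_lt (K - s') hcpos
        omega
      rw [hmod, hidxcast, PySem.List.pyGet?_natCast, hidx _ (by omega)]
      simp only [Option.getD_some]
      have hper : pvStep^[s' + c] x = pvStep^[s'] x := by
        rw [hfs]; congr 1; omega
      have := periodic_iterate x s' c hcpos hper (K - s')
      have hKs : s' + (K - s') = K := by omega
      rw [hKs] at this
      exact this.symm

theorem pvApplyK_eq (k : Int) (x : Int) : pvApplyK k x = pvStep^[k.toNat] x := by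
  unfold pvApplyK
  have h0 : (0 : Int) = ((0 : Nat) : Int) := rfl
  rw [h0]
  exact pvGo_correct k x k.toNat 0 PySem.Dict.empty []
    (by omega) rfl (by intro j hj; omega)
    (by intro v s hvs; simp [PySem.Dict.get?_empty] at hvs)

-- ===== VERDICT (by name: the statement is the Claim_ definition above) =====
theorem question1_spec : Claim_equal_question1 := by
  intro arr k _
  unfold Spec_question1 question1_alt
  rw [questionA_eq_map]
  exact List.map_congr_left (fun x _ => (pvApplyK_eq k x).symm)
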